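-- pv_equiv track=rewrite | github.com/dtbinh/UniversityCoursework | 4th Year/Text Technologies/TTS - Coursework 2/best.py | hyphencombine
-- ===== SOURCE A (Python) =====
-- def hyphencombine(hyphenlist):
--     output = []
--     for x in range(len(hyphenlist)):
--         base = ""
--         for y in range(len(hyphenlist)-x):
--             base = base+hyphenlist[x+y]
--             output.append(base)
--     return output
-- ===== SOURCE B (Python) =====
-- def hyphencombine(hyphenlist):
--     s = ''.join(hyphenlist)
--     offs = [0]
--     for w in hyphenlist:
--         offs.append(offs[-1] + len(w))
--     n = len(hyphenlist)
--     return [s[offs[x]:offs[j]] for x in range(n) for j in range(x + 1, n + 1)]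
-- ===== Notes on version B (the rewrite author's own statement) =====
-- stated objective: alternative
-- what changed: Replaces A's running-string accumulator with one global join plus a prefix-offset table, producing each output as a direct substring s[offs[x]:offs[j]] instead of extending a previous concatenation.
import Mathlib
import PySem

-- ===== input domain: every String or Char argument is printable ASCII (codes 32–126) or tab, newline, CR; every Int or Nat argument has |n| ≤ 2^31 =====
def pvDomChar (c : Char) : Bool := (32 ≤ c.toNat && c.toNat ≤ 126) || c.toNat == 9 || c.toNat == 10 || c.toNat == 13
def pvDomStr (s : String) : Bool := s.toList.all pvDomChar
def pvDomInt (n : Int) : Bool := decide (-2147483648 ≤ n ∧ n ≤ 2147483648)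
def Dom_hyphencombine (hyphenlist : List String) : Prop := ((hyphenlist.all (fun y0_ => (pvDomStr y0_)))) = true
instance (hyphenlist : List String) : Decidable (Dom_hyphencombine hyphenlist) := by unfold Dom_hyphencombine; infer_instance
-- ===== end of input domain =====

-- B replaces A's running-string accumulator with one global join plus a prefix-offset
-- table, each output taken as a direct substring s[offs[x]:offs[j]] (objective: alternative).

-- ===== PORT A =====
-- loop body of A's inner loop: base = base + hyphenlist[x+y]; output.append(base)
def hyphenStep (l : List String) (x : Int) (st : String × List String) (y : Int) :
    String × List String :=
  let base := st.1 ++ PySem.List.pyGetD l (x + y) ""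
  (base, st.2 ++ [base])

def hyphencombine (hyphenlist : List String) : List String :=
  (PySem.List.pyRange 0 (hyphenlist.length : Int)).foldl (fun output x =>
    ((PySem.List.pyRange 0 ((hyphenlist.length : Int) - x)).foldl
      (hyphenStep hyphenlist x) ("", output)).2) []

-- ===== PORT B =====
def hyphencombine_alt (hyphenlist : List String) : List String :=
  let s := PySem.Str.join "" hyphenlist
  let offs := hyphenlist.foldl
    (fun offs w => offs ++ [PySem.List.pyGetD offs (-1) 0 + PySem.Str.len w]) [(0 : Int)]
  (PySem.List.pyRange 0 (hyphenlist.length : Int)).flatMap (fun x =>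
    (PySem.List.pyRange (x + 1) ((hyphenlist.length : Int) + 1)).map (fun j =>
      PySem.Str.slice s (some (PySem.List.pyGetD offs x 0)) (some (PySem.List.pyGetD offs j 0))))

-- ===== PRECONDITION & SPEC =====
def Spec_hyphencombine (hyphenlist : List String) (out : List String) : Prop := out = hyphencombine_alt hyphenlist
instance (hyphenlist : List String) (out : List String) : Decidable (Spec_hyphencombine hyphenlist out) := by unfold Spec_hyphencombine; infer_instance

-- ===== CLAIM =====
def Claim_equal_hyphencombine : Prop := ∀ (hyphenlist : List String), Dom_hyphencombine hyphenlist → Spec_hyphencombine hyphenlist (hyphencombine hyphenlist)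

-- ===== LEMMAS AND PROOFS =====
lemma chars_join_nil : ∀ parts : List (List Char), PySem.Chars.join [] parts = parts.flatten
  | [] => by simp [PySem.Chars.join_nil]
  | [a] => by simp [PySem.Chars.join_singleton]
  | a :: b :: r => by rw [PySem.Chars.join_cons_cons]; simp [chars_join_nil (b :: r)]

lemma join_snoc (xs : List String) (s : String) :
    PySem.Str.join "" (xs ++ [s]) = PySem.Str.join "" xs ++ s := by
  simp [PySem.Str.join, chars_join_nil, String.ofList_append, String.ofList_toList]

-- J l k m = the concatenation of the m elements of l starting at index k
def J (l : List String) (k m : Nat) : String :=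
  PySem.Str.join "" ((l.drop k).take m)

lemma J_succ (l : List String) (k m : Nat) (h : k + m < l.length) :
    J l k (m + 1) = J l k m ++ PySem.List.pyGetD l ((k : Int) + (m : Int)) "" := by
  have hm : m < (l.drop k).length := by simp; omega
  have ht : (l.drop k).take (m + 1) = (l.drop k).take m ++ [(l.drop k)[m]] := by
    rw [List.take_add_one]; simp
  rw [J, J, ht, join_snoc]
  have hc : ((k : Int) + (m : Int)) = ((k + m : Nat) : Int) := by push_cast; ring
  rw [hc, PySem.List.pyGetD_natCast]
  congr 1
  rw [List.getElem_drop]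
  simp [List.getD_eq_getElem?_getD, h]

-- invariant of A's inner loop
lemma inner_fold (l : List String) (k : Nat) :
    ∀ (m : Nat), k + m ≤ l.length → ∀ (out : List String),
    List.foldl (hyphenStep l (k : Int)) ("", out) (PySem.List.pyRange 0 (m : Int))
    = (J l k m, out ++ List.map (fun y => J l k (y + 1)) (List.range m)) := by
  intro m
  induction m with
  | zero =>
    intro _ out
    simp [J, PySem.Str.join, PySem.Chars.join_nil]
  | succ m ih =>
    intro h out
    have hsplit : PySem.List.pyRange 0 ((m + 1 : Nat) : Int)
        = PySem.List.pyRange 0 (m : Int) ++ [(m : Int)] := by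
      have : ((m + 1 : Nat) : Int) = (m : Int) + 1 := by push_cast; ring
      rw [this, PySem.List.pyRange_one_succ_right (by positivity)]
    rw [hsplit, List.foldl_append, ih (by omega) out]
    simp only [List.foldl_cons, List.foldl_nil, hyphenStep]
    rw [← J_succ l k m (by omega)]
    simp [List.range_succ]

-- A's loops produce the flatMap of all J-values
lemma hyphencombine_eq_flatMap (l : List String) :
    hyphencombine l = (List.range l.length).flatMap
      (fun k => List.map (fun y => J l k (y + 1)) (List.range (l.length - k))) := by
  rw [hyphencombine, PySem.List.pyRange_zero_natCast, List.foldl_map]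
  rw [PySem.List.foldl_congr_mem (List.range l.length) _
    (fun output k => output ++ List.map (fun y => J l k (y + 1)) (List.range (l.length - k))) []
    ?_]
  · exact PySem.List.foldl_append_eq_flatMap _ _ _
  · intro out k hk
    rw [List.mem_range] at hk
    have h1 : ((l.length : Int) - (k : Int)) = ((l.length - k : Nat) : Int) := by omega
    rw [h1, inner_fold l k (l.length - k) (by omega) out]

-- prefix offsets, String and List Char versions
def offN (l : List String) (k : Nat) : Nat := ((l.take k).map (fun w => w.toList.length)).sum
def offC (L : List (List Char)) (k : Nat) : Nat := ((L.take k).map List.length).sum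

lemma pyGetD_neg_one {α : Type} (acc : List α) (d : α) (h : acc ≠ []) :
    PySem.List.pyGetD acc (-1) d = acc.getLast h := by
  have hl : 0 < acc.length := List.length_pos_iff.mpr h
  simp only [PySem.List.pyGetD, PySem.List.pyGet?, PySem.List.pyIdx?]
  rw [if_neg (by omega), if_pos (by omega)]
  simp only [Option.bind_some]
  rw [List.getLast_eq_getElem]
  have h1 : (-(-1:Int)).toNat = 1 := by decide
  rw [h1]
  simp [List.getElem?_eq_getElem (by omega : acc.length - 1 < acc.length)]

-- B's offset loop builds exactly the prefix-length table
lemma offs_spec (l : List String) :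
    List.foldl (fun offs w => offs ++ [PySem.List.pyGetD offs (-1) 0 + PySem.Str.len w]) [(0:Int)] l
    = (List.range (l.length + 1)).map (fun k => (offN l k : Int)) := by
  induction l using List.reverseRecOn with
  | nil => simp [offN]
  | append_singleton t w ih =>
    rw [List.foldl_append, ih]
    simp only [List.foldl_cons, List.foldl_nil]
    have hne : (List.range (t.length + 1)).map (fun k => (offN t k : Int)) ≠ [] := by
      simp [List.range_succ]
    rw [pyGetD_neg_one _ _ hne]
    have hlast : ((List.range (t.length + 1)).map (fun k => (offN t k : Int))).getLast hne
        = (offN t t.length : Int) := by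
      rw [List.getLast_eq_getElem]
      simp
    rw [hlast]
    have hlen : (t ++ [w]).length + 1 = (t.length + 1) + 1 := by simp
    rw [hlen]
    conv_rhs => rw [List.range_succ, List.map_append]
    congr 1
    · apply List.map_congr_left
      intro k hk
      rw [List.mem_range] at hk
      have : offN (t ++ [w]) k = offN t k := by
        unfold offN
        rw [List.take_append_of_le_length (by omega)]
      rw [this]
    · simp only [List.map]
      congr 1
      have h1 : offN (t ++ [w]) (t.length + 1) = offN t t.length + w.toList.length := by
        unfold offN
        rw [List.take_of_length_le (by simp), List.take_of_length_le (by simp)]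
        simp
      rw [h1, PySem.Str.len_eq]
      push_cast
      ring

lemma drop_flatten_off (L : List (List Char)) (k : Nat) :
    L.flatten.drop (offC L k) = (L.drop k).flatten := by
  induction L generalizing k with
  | nil => simp [offC]
  | cons a t ih =>
    cases k with
    | zero => simp [offC]
    | succ k =>
      simp only [offC, List.take_succ_cons, List.map_cons, List.sum_cons, List.flatten_cons,
        List.drop_succ_cons]
      rw [List.drop_length_add_append]
      exact ih k

lemma take_flatten_off (L : List (List Char)) (k : Nat) :
    L.flatten.take (offC L k) = (L.take k).flatten := by
  induction L generalizing k with
  | nil => simp [offC]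
  | cons a t ih =>
    cases k with
    | zero => simp [offC]
    | succ k =>
      simp only [offC, List.take_succ_cons, List.map_cons, List.sum_cons, List.flatten_cons]
      rw [List.take_length_add_append]
      simp only [offC] at ih
      rw [ih k]

lemma offC_add (L : List (List Char)) (k m : Nat) :
    offC L (k + m) = offC L k + offC (L.drop k) m := by
  unfold offC
  rw [List.take_add, List.map_append, List.sum_append]

lemma slice_flatten (L : List (List Char)) (k m : Nat) :
    (L.flatten.drop (offC L k)).take (offC L (k + m) - offC L k) = ((L.drop k).take m).flatten := by
  rw [drop_flatten_off, offC_add, Nat.add_sub_cancel_left, take_flatten_off]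

lemma offN_eq_offC (l : List String) (k : Nat) :
    offN l k = offC (l.map String.toList) k := by
  unfold offN offC
  rw [← List.map_take, List.map_map]
  rfl

lemma toList_J (l : List String) (k m : Nat) :
    (J l k m).toList = (((l.map String.toList).drop k).take m).flatten := by
  rw [J, PySem.Str.toList_join, show ("" : String).toList = [] from rfl, chars_join_nil]
  simp [← List.map_drop, ← List.map_take]

-- the slice of the global join at prefix offsets is exactly J
lemma slice_join_eq_J (l : List String) (k m : Nat) :
    PySem.Str.slice (PySem.Str.join "" l) (some (offN l k : Int)) (some (offN l (k + m) : Int))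
    = J l k m := by
  apply String.toList_inj.mp
  rw [PySem.Str.toList_slice, toList_J]
  show PySem.List.slice (PySem.Str.join "" l).toList _ _ = _
  rw [PySem.List.slice_natCast, PySem.Str.toList_join, show ("" : String).toList = [] from rfl,
    chars_join_nil]
  rw [show List.map String.toList l = (l.map String.toList) from rfl]
  rw [offN_eq_offC, offN_eq_offC]
  exact slice_flatten (l.map String.toList) k m

-- ===== VERDICT =====
theorem hyphencombine_spec : Claim_equal_hyphencombine := by
  intro l _
  unfold Spec_hyphencombine
  rw [hyphencombine_eq_flatMap]
  show _ = (PySem.List.pyRange 0 (l.length : Int)).flatMap _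
  rw [offs_spec, PySem.List.pyRange_zero_natCast, List.flatMap_map]
  apply List.flatMap_congr
  intro k hk
  rw [List.mem_range] at hk
  rw [PySem.List.pyRange_of_pos _ _ (by norm_num : (0:Int) < 1)]
  have hlt : ((k : Int) + 1) < ((l.length : Int) + 1) := by omega
  rw [if_pos hlt]
  have h2 : (((l.length : Int) + 1 - ((k : Int) + 1) + 1 - 1) / 1).toNat = l.length - k := by omega
  rw [h2, List.map_map]
  apply List.map_congr_left
  intro y hy
  rw [List.mem_range] at hy
  simp only [Function.comp]
  have h3 : ((k : Int) + 1 + 1 * (y : Int)) = (((k + 1 + y : Nat)) : Int) := by push_cast; ring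
  rw [h3]
  have hgk : PySem.List.pyGetD ((List.range (l.length + 1)).map (fun i => (offN l i : Int))) (k : Int) 0
      = (offN l k : Int) := by
    rw [PySem.List.pyGetD_natCast]
    simp [List.getD_eq_getElem?_getD, List.getElem?_map, List.getElem?_range (by omega : k < l.length + 1)]
  have hgj : PySem.List.pyGetD ((List.range (l.length + 1)).map (fun i => (offN l i : Int))) ((k + 1 + y : Nat) : Int) 0
      = (offN l (k + 1 + y) : Int) := by
    rw [PySem.List.pyGetD_natCast]
    simp [List.getD_eq_getElem?_getD, List.getElem?_map, List.getElem?_range (by omega : k + 1 + y < l.length + 1)]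
  rw [hgk, hgj]
  have : k + 1 + y = k + (y + 1) := by omega
  rw [this, slice_join_eq_J]
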